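-- pv_equiv track=rewrite | github.com/Algo-Git/Code | 43차시/PRO_조이스틱/PRO_조이스틱_kdy.py | solution
-- ===== SOURCE A (Python) =====
-- def solution(name):
--     answer = 0 #조이스틱 조작 횟수의 최솟값
--     l = len(name) #이름 길이
--     m = l-1 #이동횟수 최솟값 => 가장 큰 값으로 초기화(이름 길이-1)
--     if name.count('A') == l: #모든 문자가 A로만 이루어진 경우
--         return 0 #조작 횟수 0
--     for i, n in enumerate(name): #이름 살펴보기
--         if n != 'A': #A가 아닐때
--             answer+=min([ord(n)-ord('A'), ord('Z')-ord(n)+1]) #▲▼중 최소 조작 횟수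
--             idx = i+1 #현재 문자 다음 문자
--             for j in range(i+1, l): #한 칸 옆부터 끝까지 살펴보기
--                 if name[j] == 'A': #A이면
--                     idx += 1 #계속 이동
--                 else: #A가 아니면
--                     break #그만 살펴보기
-- 						#현재까지 이동횟수 최솟값, A가 연속된 구간을 기준으로 오/왼 영역 중 짧은 부분을 2번 이동하고 나머지를 한 번씩 이동
--             m = min([m, i*2+l-idx, (l-idx)*2+i])
--     return answer+m #알파벳 조작 횟수 + 이동 횟수
-- ===== SOURCE B (Python) =====
-- def solution(name):
--     l = len(name)
--     if all(c == 'A' for c in name):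
--         return 0
--     vertical = sum(min(ord(c) - 65, 91 - ord(c)) for c in name if c != 'A')
--     # nxt[k] = first index >= k whose char is not 'A', or l if none
--     nxt = [l] * (l + 1)
--     for i in range(l - 1, -1, -1):
--         nxt[i] = nxt[i + 1] if name[i] == 'A' else i
--     m = l - 1
--     for i, c in enumerate(name):
--         if c != 'A':
--             r = nxt[i + 1]
--             m = min(m, 2 * i + l - r, 2 * (l - r) + i)
--     return vertical + m
-- ===== Notes on version B (the rewrite author's own statement) =====
-- stated objective: faster
-- what changed: A's inner break-scan past consecutive runs of one repeated letter (restarted at every pivot position) is replaced by one backward pass building a next-relevant-index table, plus a separate single-pass vertical-cost sum.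
import Mathlib
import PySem

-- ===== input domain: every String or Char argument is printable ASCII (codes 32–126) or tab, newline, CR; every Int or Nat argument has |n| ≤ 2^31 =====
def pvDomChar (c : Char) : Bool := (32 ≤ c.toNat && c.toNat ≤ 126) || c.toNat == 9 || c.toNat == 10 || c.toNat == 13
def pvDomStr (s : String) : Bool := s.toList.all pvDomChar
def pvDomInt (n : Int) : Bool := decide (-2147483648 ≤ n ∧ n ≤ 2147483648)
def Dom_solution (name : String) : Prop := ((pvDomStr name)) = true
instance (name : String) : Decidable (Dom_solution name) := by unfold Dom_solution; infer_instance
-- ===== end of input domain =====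

-- B replaces A's quadratic inner break-scan by a single backward pass building a
-- next-non-'A' table (plus a separate one-pass vertical sum): alternative decomposition,
-- O(n) instead of O(n^2) in the worst case.

-- ===== PORT A =====
-- inner 'for j in range(i+1, l): if name[j] == "A": idx += 1 else: break'
-- (name[j] is always in range here, so the 'none' arm of pyGet? is unreachable)
def pvScanA (cs : List Char) (idx : Int) (js : List Int) : Int :=
  match js with
  | [] => idx
  | j :: rest =>
    match PySem.List.pyGet? cs j with
    | some c => if c = 'A' then pvScanA cs (idx + 1) rest else idx
    | none => idx

def solution (name : String) : Int :=
  let cs := name.toList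
  let l : Int := cs.length
  let m0 : Int := l - 1
  if ((PySem.Str.count name "A" : Nat) : Int) = l then 0
  else
    let res := (PySem.List.enumerate cs).foldl (fun (st : Int × Int) (p : Int × Char) =>
      if p.2 ≠ 'A' then
        (st.1 + min ((p.2.toNat : Int) - ('A'.toNat : Int)) (('Z'.toNat : Int) - (p.2.toNat : Int) + 1),
         let idx := pvScanA cs (p.1 + 1) (PySem.List.pyRange (p.1 + 1) l 1)
         min (min st.2 (p.1 * 2 + l - idx)) ((l - idx) * 2 + p.1))
      else st) (0, m0)
    res.1 + res.2

-- ===== PORT B =====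
-- the backward loop 'for i in range(l-1, -1, -1): nxt[i] = nxt[i+1] if name[i]=="A" else i'
-- built right-to-left as a list: pvNxt cs i = [nxt[i], nxt[i+1], …, nxt[l]] for the suffix cs
def pvNxt (cs : List Char) (i : Int) : List Int :=
  match cs with
  | [] => [i]
  | c :: rest =>
    let t := pvNxt rest (i + 1)
    (if c = 'A' then t.headD i else i) :: t

def solution_alt (name : String) : Int :=
  let cs := name.toList
  let l : Int := cs.length
  if cs.all (fun c => c = 'A') then 0
  else
    let vertical := cs.foldl (fun a c =>
      if c ≠ 'A' then a + min ((c.toNat : Int) - 65) (91 - (c.toNat : Int)) else a) 0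
    let nxt := pvNxt cs 0
    let m := (PySem.List.enumerate cs).foldl (fun (m : Int) (p : Int × Char) =>
      if p.2 ≠ 'A' then
        let r := PySem.List.pyGetD nxt (p.1 + 1) l
        min (min m (2 * p.1 + l - r)) (2 * (l - r) + p.1)
      else m) (l - 1)
    vertical + m

-- ===== PRECONDITION & SPEC =====
def Spec_solution (name : String) (out : Int) : Prop := out = solution_alt name
instance (name : String) (out : Int) : Decidable (Spec_solution name out) := by unfold Spec_solution; infer_instance

-- ===== CLAIM (what is proved, stated in full; the proofs are below) =====
def Claim_equal_solution : Prop := ∀ (name : String), Dom_solution name → Spec_solution name (solution name)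

-- ===== LEMMAS AND PROOFS =====

-- reference function: first index ≥ base that is not 'A' (base + offset form)
def pvFna (cs : List Char) (i : Int) : Int :=
  match cs with
  | [] => i
  | c :: rest => if c = 'A' then pvFna rest (i + 1) else i

theorem pvNxt_headD (cVs : List Char) (i d : Int) : (pvNxt cVs i).head?.getD d = pvFna cVs i := by
  induction cVs generalizing i d with
  | nil => simp [pvNxt, pvFna]
  | cons c rest ih =>
    simp only [pvNxt, pvFna, List.head?_cons, Option.getD_some]
    by_cases h : c = 'A' <;> simp [h, ih]

theorem pvNxt_getD (cs : List Char) (i : Int) (k : Nat) (d : Int) (hk : k ≤ cs.length) :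
    (pvNxt cs i).getD k d = pvFna (cs.drop k) (i + k) := by
  induction cs generalizing i k with
  | nil =>
    have hk0 : k = 0 := by simpa using hk
    subst hk0
    simp [pvNxt, pvFna]
  | cons c rest ih =>
    cases k with
    | zero =>
      simp only [pvNxt, pvFna, List.getD_cons_zero, List.drop_zero, Int.natCast_zero, add_zero]
      by_cases h : c = 'A' <;> simp [h, List.headD_eq_head?_getD, pvNxt_headD]
    | succ k' =>
      simp only [pvNxt, List.getD_cons_succ, List.drop_succ_cons]
      rw [ih (i + 1) k' (by simpa using hk)]
      congr 1
      push_cast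
      ring

-- A's break-scan from index k computes the same first-non-'A' index
theorem pvScanA_eq_fna (cs : List Char) (k : Nat) (hk : k ≤ cs.length) :
    pvScanA cs (k : Int) (PySem.List.pyRange (k : Int) (cs.length : Int) 1) =
      pvFna (cs.drop k) (k : Int) := by
  rcases Nat.lt_or_ge k cs.length with hlt | hge
  · have hd : cs.drop k = cs[k] :: cs.drop (k + 1) := List.drop_eq_getElem_cons hlt
    rw [PySem.List.pyRange_one_cons (by exact_mod_cast hlt)]
    have hget : PySem.List.pyGet? cs (k : Int) = some cs[k] := by
      rw [PySem.List.pyGet?_natCast]; simp [hlt]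
    simp only [pvScanA, hget, hd, pvFna]
    by_cases h : cs[k] = 'A'
    · have := pvScanA_eq_fna cs (k + 1) hlt
      push_cast at this ⊢
      simp [h, this]
    · simp [h]
  · have hk' : k = cs.length := le_antisymm hk hge
    subst hk'
    rw [PySem.List.pyRange_one_eq_nil (le_refl _)]
    simp [pvScanA, List.drop_length, pvFna]
termination_by cs.length - k

-- membership in enumerate gives the index range
theorem pvMem_enumerate {α : Type} (cs : List α) (s : Int) (p : Int × α)
    (hp : p ∈ PySem.List.enumerate cs s) :
    ∃ k : Nat, (k : Int) < cs.length ∧ p.1 = s + k := by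
  induction cs generalizing s with
  | nil => simp [PySem.List.enumerate_nil] at hp
  | cons c rest ih =>
    rw [PySem.List.enumerate_cons] at hp
    rcases List.mem_cons.mp hp with h | h
    · refine ⟨0, ?_, by simp [h]⟩
      simp only [List.length_cons]
      push_cast
      omega
    · obtain ⟨k, hk, hs⟩ := ih (s + 1) h
      refine ⟨k + 1, ?_, ?_⟩
      · simp only [List.length_cons] at hk ⊢
        push_cast at hk ⊢
        omega
      · push_cast at hs ⊢
        omega

-- a pair-state foldl whose components do not interact splits componentwise
theorem pvFoldl_pair {α : Type} (xs : List α) (f g : Int → α → Int) (a b : Int) :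
    xs.foldl (fun (st : Int × Int) x => (f st.1 x, g st.2 x)) (a, b) =
      (xs.foldl f a, xs.foldl g b) := by
  induction xs generalizing a b with
  | nil => rfl
  | cons x xs ih => simp [List.foldl_cons, ih]

-- a foldl over enumerate that ignores the index is a foldl over the list
theorem pvFoldl_enumerate_snd {α : Type} (cs : List α) (s : Int) (h : Int → α → Int) (a : Int) :
    (PySem.List.enumerate cs s).foldl (fun acc p => h acc p.2) a = cs.foldl h a := by
  induction cs generalizing s a with
  | nil => simp [PySem.List.enumerate_nil]
  | cons c rest ih => simp [PySem.List.enumerate_cons, List.foldl_cons, ih]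

-- Python's name.count('A') on a single-character pattern is the character count
theorem pvCountGo (cs : List Char) (fuel acc : Nat) (hf : cs.length ≤ fuel) :
    PySem.Chars.count.go ['A'] fuel cs acc = acc + cs.count 'A' := by
  induction cs generalizing fuel acc with
  | nil => cases fuel <;> simp [PySem.Chars.count.go]
  | cons c rest ih =>
    cases fuel with
    | zero => simp at hf
    | succ f =>
      rw [PySem.Chars.count.go]
      by_cases h : c = 'A'
      · subst h
        rw [if_pos (by simp [List.isPrefixOf])]
        have hdrop : List.drop (['A'].length) ('A' :: rest) = rest := rfl
        rw [hdrop, ih f (acc + 1) (by simpa using hf)]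
        simp
        omega
      · rw [if_neg (by simp [List.isPrefixOf]; exact fun hc => h hc.symm)]
        rw [ih f acc (by simpa using hf)]
        simp [h]

theorem pvCountA (cs : List Char) : PySem.Chars.count cs ['A'] = cs.count 'A' := by
  rw [PySem.Chars.count]
  simp only [List.isEmpty_cons, if_neg Bool.false_ne_true]
  simpa using pvCountGo cs cs.length 0 le_rfl

-- the two all-'A' tests agree
theorem pvAllA (name : String) :
    (((PySem.Str.count name "A" : Nat) : Int) = (name.toList.length : Int)) ↔
      name.toList.all (fun c => c = 'A') = true := by
  rw [PySem.Str.count_eq]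
  have : ("A" : String).toList = ['A'] := rfl
  rw [this, pvCountA]
  rw [Int.natCast_inj]
  rw [List.count_eq_length, List.all_eq_true]
  constructor
  · intro h x hx
    simpa using (h x hx).symm
  · intro h b hb
    have := h b hb
    simp at this
    exact this.symm

-- ===== VERDICT (by name: the statement is the Claim_ definition above) =====
theorem solution_spec : Claim_equal_solution := by
  intro name _
  unfold Spec_solution solution solution_alt
  set cs := name.toList with hcs
  simp only
  by_cases hall : ((PySem.Str.count name "A" : Nat) : Int) = (cs.length : Int)
  · rw [if_pos hall, if_pos ((pvAllA name).mp hall)]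
  · rw [if_neg hall, if_neg (fun h => hall ((pvAllA name).mpr h))]
    -- split A's pair fold into its two components
    have hsplit :
        (PySem.List.enumerate cs).foldl (fun (st : Int × Int) (p : Int × Char) =>
          if p.2 ≠ 'A' then
            (st.1 + min ((p.2.toNat : Int) - ('A'.toNat : Int)) (('Z'.toNat : Int) - (p.2.toNat : Int) + 1),
             let idx := pvScanA cs (p.1 + 1) (PySem.List.pyRange (p.1 + 1) (cs.length : Int) 1)
             min (min st.2 (p.1 * 2 + (cs.length : Int) - idx)) (((cs.length : Int) - idx) * 2 + p.1))
          else st) (0, (cs.length : Int) - 1) =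
        ((PySem.List.enumerate cs).foldl (fun (a : Int) (p : Int × Char) =>
           if p.2 ≠ 'A' then a + min ((p.2.toNat : Int) - 65) (91 - (p.2.toNat : Int)) else a) 0,
         (PySem.List.enumerate cs).foldl (fun (m : Int) (p : Int × Char) =>
           if p.2 ≠ 'A' then
             let idx := pvScanA cs (p.1 + 1) (PySem.List.pyRange (p.1 + 1) (cs.length : Int) 1)
             min (min m (p.1 * 2 + (cs.length : Int) - idx)) (((cs.length : Int) - idx) * 2 + p.1)
           else m) ((cs.length : Int) - 1)) := by
      rw [← pvFoldl_pair]
      apply PySem.List.foldl_congr_mem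
      intro acc p _
      by_cases h : p.2 = 'A'
      · simp [h]
      · simp only [h, ne_eq, not_false_eq_true, if_pos]
        have h65 : ('A'.toNat : Int) = 65 := by decide
        have h90 : ('Z'.toNat : Int) = 90 := by decide
        rw [h65, h90]
        congr 1
        omega
    rw [hsplit]
    congr 1
    · -- vertical component: enumerate fold ignoring the index = plain fold
      exact pvFoldl_enumerate_snd cs 0
        (fun a c => if c ≠ 'A' then a + min ((c.toNat : Int) - 65) (91 - (c.toNat : Int)) else a) 0
    · -- move component: A's break-scan = B's table lookup, pointwise on the enumerated list
      apply PySem.List.foldl_congr_mem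
      intro acc p hp
      by_cases h : p.2 = 'A'
      · simp [h]
      · obtain ⟨k, hk, hs⟩ := pvMem_enumerate cs 0 p hp
        rw [zero_add] at hs
        have hk' : k < cs.length := by exact_mod_cast hk
        have hkk : k + 1 ≤ cs.length := hk'
        have hscan : pvScanA cs (p.1 + 1) (PySem.List.pyRange (p.1 + 1) (cs.length : Int) 1) =
            pvFna (cs.drop (k + 1)) ((k + 1 : Nat) : Int) := by
          rw [hs]
          have : (k : Int) + 1 = ((k + 1 : Nat) : Int) := by push_cast; ring
          rw [this]
          exact pvScanA_eq_fna cs (k + 1) hkk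
        have hgetD : PySem.List.pyGetD (pvNxt cs 0) (p.1 + 1) (cs.length : Int) =
            pvFna (cs.drop (k + 1)) ((k + 1 : Nat) : Int) := by
          rw [hs]
          have : (k : Int) + 1 = ((k + 1 : Nat) : Int) := by push_cast; ring
          rw [this, PySem.List.pyGetD_natCast]
          rw [pvNxt_getD cs 0 (k + 1) (cs.length : Int) hkk]
          rw [zero_add]
        simp only [h, ne_eq, not_false_eq_true, if_pos, hscan, hgetD]
        ring_nf
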